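-- pv_equiv track=rewrite | github.com/seemoo-lab/woot24_cfi_coverage_tools | wcfg/filter_pa_instructions.py | ins_frequency
-- ===== SOURCE A (Python) =====
-- pa_instructions = ["'pacibsp'", "'autibsp'", "'xpaclri'"]
--
-- def ins_frequency(ls):
--     from collections import Counter
--     cnt = Counter({k: 0 for k in pa_instructions})
--
--     for l in ls:
--         for ins in pa_instructions:
--             if ins in l:
--                 cnt[ins] += 1
--     for k in list(cnt.keys()):
--         if not cnt[k]:
--             del cnt[k]
--     return cnt
-- ===== SOURCE B (Python) =====
-- pa_instructions = ["'pacibsp'", "'autibsp'", "'xpaclri'"]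
--
-- def ins_frequency(ls):
--     from collections import Counter
--     # Anchored scan: every instruction is a 9-char token starting with "'", so instead of
--     # substring membership tests we slide once over each line, slice a 9-char window at every
--     # quote character, and collect the windows that are instructions.
--     totals = {}
--     for line in ls:
--         hits = {line[i:i + 9] for i in range(len(line))
--                 if line[i] == "'" and line[i:i + 9] in pa_instructions}
--         for ins in hits:
--             totals[ins] = totals.get(ins, 0) + 1
--     return Counter({ins: totals[ins] for ins in pa_instructions if ins in totals})
-- ===== Notes on version B (the rewrite author's own statement) =====
-- stated objective: alternative
-- what changed: B never performs a substring-membership test: it slides once over each line, slices a 9-character window at every quote character (all three instructions are 9-char quote-delimited tokens), collects the matching windows into a per-line set, tallies those sets into a dict, and finally assembles the Counter in pa_instructions order from the nonzero tallies, replacing A's per-(line,instruction) 'in' tests on a pre-zeroed Counter plus a deletion pass.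
import Mathlib
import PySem

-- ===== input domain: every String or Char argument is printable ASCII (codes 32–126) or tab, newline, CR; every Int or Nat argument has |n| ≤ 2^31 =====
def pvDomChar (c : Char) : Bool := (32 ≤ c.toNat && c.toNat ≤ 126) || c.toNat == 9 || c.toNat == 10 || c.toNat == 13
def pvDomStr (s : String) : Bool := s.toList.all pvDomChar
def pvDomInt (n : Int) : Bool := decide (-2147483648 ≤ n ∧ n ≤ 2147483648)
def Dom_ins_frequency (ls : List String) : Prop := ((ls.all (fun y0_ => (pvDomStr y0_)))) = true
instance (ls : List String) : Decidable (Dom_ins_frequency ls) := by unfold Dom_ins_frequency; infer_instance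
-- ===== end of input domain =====

-- B replaces A's per-(line,instruction) substring-membership tests by a single anchored scan per
-- line (a 9-char window sliced at every quote character, collected into a per-line hit set and
-- tallied into a dict, assembled in pa_instructions order at the end); objective: alternative.

-- ===== PORT A =====
def pa_instructions : List String := ["'pacibsp'", "'autibsp'", "'xpaclri'"]

def ins_frequency (ls : List String) : List (String × Int) :=
  let cnt0 : PySem.Dict String Int :=
    pa_instructions.foldl (fun d k => d.insert k 0) PySem.Dict.empty
  let cnt1 : PySem.Dict String Int :=
    ls.foldl (fun d l =>
      pa_instructions.foldl (fun d ins =>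
        if PySem.Str.isIn ins l then d.modify ins 0 (· + 1) else d) d) cnt0
  let cnt2 : PySem.Dict String Int :=
    cnt1.keys.foldl (fun d k => if d.getD k 0 == 0 then d.erase k else d) cnt1
  cnt2.items

-- ===== PORT B =====
def ins_frequency_alt (ls : List String) : List (String × Int) :=
  let totals : PySem.Dict String Int :=
    ls.foldl (fun totals line =>
      let hits : PySem.Set String :=
        PySem.Set.ofList
          (((PySem.List.pyRange 0 (PySem.Str.len line) 1).filter (fun i =>
              PySem.Str.pyGet? line i == some '\'' &&
              pa_instructions.contains (PySem.Str.slice line (some i) (some (i + 9))))).map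
            (fun i => PySem.Str.slice line (some i) (some (i + 9))))
      hits.foldl (fun t ins => t.insert ins (t.getD ins 0 + 1)) totals)
      PySem.Dict.empty
  (pa_instructions.foldl (fun d ins =>
      if totals.contains ins then d.insert ins (totals.getD ins 0) else d)
    PySem.Dict.empty).items

-- ===== PRECONDITION & SPEC =====
def Spec_ins_frequency (ls : List String) (out : List (String × Int)) : Prop := out = ins_frequency_alt ls
instance (ls : List String) (out : List (String × Int)) : Decidable (Spec_ins_frequency ls out) := by unfold Spec_ins_frequency; infer_instance

-- ===== CLAIM (what is proved, stated in full; the proofs are below) =====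
def Claim_equal_ins_frequency : Prop := ∀ (ls : List String), Dom_ins_frequency ls → Spec_ins_frequency ls (ins_frequency ls)

-- ===== LEMMAS AND PROOFS =====

-- B's per-line window comprehension, named for the proofs (identical to the port's inline list)
def pvHitsList (line : String) : List String :=
  ((PySem.List.pyRange 0 (PySem.Str.len line) 1).filter (fun i =>
      PySem.Str.pyGet? line i == some '\'' &&
      pa_instructions.contains (PySem.Str.slice line (some i) (some (i + 9))))).map
    (fun i => PySem.Str.slice line (some i) (some (i + 9)))

-- B's totals keeps no key at count 0: encode a Nat count as totals.get?'s value
def pvEnc (n : Nat) : Option Int := if n = 0 then none else some (n : Int)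

-- soundness of the anchored scan: every collected window is an instruction contained in the line
theorem pvStrEq (s t : String) (h : s.toList = t.toList) : s = t := by
  have := congrArg String.ofList h
  simpa using this

theorem pvHits_sound (line x : String) (hx : x ∈ pvHitsList line) :
    x ∈ pa_instructions ∧ PySem.Str.isIn x line = true := by
  unfold pvHitsList at hx
  rcases List.mem_map.1 hx with ⟨i, hi, rfl⟩
  rcases List.mem_filter.1 hi with ⟨hrange, hcond⟩
  rw [Bool.and_eq_true] at hcond
  obtain ⟨hq, hpa⟩ := hcond
  have hmem : PySem.Str.slice line (some i) (some (i + 9)) ∈ pa_instructions := by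
    simpa using hpa
  refine ⟨hmem, ?_⟩
  have h0 := (PySem.List.mem_pyRange_one).1 hrange
  rw [PySem.Str.isIn_iff_infix]
  have hts : (PySem.Str.slice line (some i) (some (i + 9))).toList
      = (line.toList.drop i.toNat).take ((i + 9).toNat - i.toNat) := by
    simp only [PySem.Str.toList_slice, PySem.Chars.slice_eq_listSlice]
    exact PySem.List.slice_toNat _ h0.1 (by omega)
  rw [hts]
  exact ((line.toList.drop i.toNat).take_prefix _).isInfix.trans
    (line.toList.drop_suffix i.toNat).isInfix

-- completeness: an instruction contained in the line is collected by the scan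
theorem pvHits_complete (line k : String) (hk : k ∈ pa_instructions)
    (h : PySem.Str.isIn k line = true) : k ∈ pvHitsList line := by
  have hlen : k.toList.length = 9 := by
    simp only [pa_instructions, List.mem_cons, List.not_mem_nil, or_false] at hk
    rcases hk with rfl | rfl | rfl <;> decide
  have hhead : k.toList[0]? = some '\'' := by
    simp only [pa_instructions, List.mem_cons, List.not_mem_nil, or_false] at hk
    rcases hk with rfl | rfl | rfl <;> decide
  have h' : PySem.Chars.isIn k.toList line.toList = true := by simpa using h
  obtain ⟨j, hpre⟩ := (PySem.Chars.exists_prefix_drop_iff_isIn _ _).2 h'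
  have hjlt : j < line.toList.length := by
    by_contra hge
    rw [not_lt] at hge
    rw [List.drop_eq_nil_of_le hge] at hpre
    have := hpre.length_le
    simp [hlen] at this
  have htake : (line.toList.drop j).take 9 = k.toList := by
    have := List.prefix_iff_eq_take.1 hpre
    rw [hlen] at this
    exact this.symm
  have hslice : PySem.Str.slice line (some (j : Int)) (some ((j : Int) + 9)) = k := by
    apply pvStrEq
    have hts : (PySem.Str.slice line (some (j : Int)) (some ((j : Int) + 9))).toList
        = PySem.List.slice line.toList (some (j : Int)) (some ((j : Int) + 9)) := by
      simp only [PySem.Str.toList_slice, PySem.Chars.slice_eq_listSlice]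
    rw [hts]
    have h9 : ((j : Int) + 9) = ((j : Int) + ((9 : Nat) : Int)) := by norm_num
    rw [h9, PySem.List.slice_natCast_add]
    exact htake
  have hq : PySem.Str.pyGet? line (j : Int) = some '\'' := by
    have hget : line.toList[j]? = some '\'' := by
      obtain ⟨t, ht⟩ := hpre
      have hd : (line.toList.drop j).head? = k.toList.head? := by
        rw [← ht]
        cases hcs : k.toList with
        | nil => rw [hcs] at hlen; simp at hlen
        | cons c cs => simp
      rw [List.head?_drop] at hd
      rw [hd, List.head?_eq_getElem?, hhead]
    simpa using hget
  unfold pvHitsList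
  refine List.mem_map.2 ⟨(j : Int), List.mem_filter.2 ⟨?_, ?_⟩, hslice⟩
  · rw [PySem.List.mem_pyRange_one]
    refine ⟨Int.natCast_nonneg j, ?_⟩
    have : PySem.Str.len line = (line.toList.length : Int) := by simp
    rw [this]
    exact_mod_cast hjlt
  · rw [Bool.and_eq_true]
    refine ⟨by rw [hq]; simp, ?_⟩
    rw [hslice]
    simpa using hk

theorem pvHits_mem (line k : String) (hk : k ∈ pa_instructions) :
    (k ∈ PySem.Set.ofList (pvHitsList line)) ↔ PySem.Str.isIn k line = true := by
  rw [PySem.Set.mem_ofList]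
  exact ⟨fun h => (pvHits_sound line k h).2, fun h => pvHits_complete line k hk h⟩

-- effect of the per-line tally loop over a duplicate-free hit list
theorem pvSetFold (hs : List String) (hnd : hs.Nodup) (t : PySem.Dict String Int) (k : String) :
    (hs.foldl (fun t ins => t.insert ins (t.getD ins 0 + 1)) t).get? k
      = if k ∈ hs then some (t.getD k 0 + 1) else t.get? k := by
  induction hs generalizing t with
  | nil => simp
  | cons x hs ih =>
      have hx : x ∉ hs := (List.nodup_cons.1 hnd).1
      have hnd' : hs.Nodup := (List.nodup_cons.1 hnd).2
      rw [List.foldl_cons, ih hnd']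
      by_cases hkx : k = x
      · subst hkx
        rw [if_neg hx, if_pos (List.mem_cons_self), PySem.Dict.get?_insert_self]
      · rw [PySem.Dict.get?_insert_of_ne, PySem.Dict.getD_insert_of_ne]
        · simp only [List.mem_cons, hkx, false_or]
        · exact hkx
        · exact hkx

theorem pvGetD_enc (t : PySem.Dict String Int) (k : String) (n : Nat)
    (h : t.get? k = pvEnc n) : t.getD k 0 = (n : Int) := by
  rw [PySem.Dict.getD_eq_get?_getD, h]
  unfold pvEnc; split_ifs with h0 <;> simp [h0]

-- the whole-loop invariant: totals.get? at each instruction encodes the number of lines containing it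
theorem pvLoopB (ls : List String) (t : PySem.Dict String Int) (n1 n2 n3 : Nat)
    (h1 : t.get? "'pacibsp'" = pvEnc n1) (h2 : t.get? "'autibsp'" = pvEnc n2)
    (h3 : t.get? "'xpaclri'" = pvEnc n3) :
    (ls.foldl (fun totals line =>
        (PySem.Set.ofList (pvHitsList line)).foldl
          (fun t ins => t.insert ins (t.getD ins 0 + 1)) totals) t).get? "'pacibsp'"
        = pvEnc (n1 + ls.countP (fun l => PySem.Str.isIn "'pacibsp'" l)) ∧
    (ls.foldl (fun totals line =>
        (PySem.Set.ofList (pvHitsList line)).foldl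
          (fun t ins => t.insert ins (t.getD ins 0 + 1)) totals) t).get? "'autibsp'"
        = pvEnc (n2 + ls.countP (fun l => PySem.Str.isIn "'autibsp'" l)) ∧
    (ls.foldl (fun totals line =>
        (PySem.Set.ofList (pvHitsList line)).foldl
          (fun t ins => t.insert ins (t.getD ins 0 + 1)) totals) t).get? "'xpaclri'"
        = pvEnc (n3 + ls.countP (fun l => PySem.Str.isIn "'xpaclri'" l)) := by
  induction ls generalizing t n1 n2 n3 with
  | nil => simpa using ⟨h1, h2, h3⟩
  | cons l ls ih =>
      simp only [List.foldl_cons]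
      have hnd := PySem.Set.nodup_ofList (pvHitsList l)
      have step : ∀ k n, k ∈ pa_instructions → t.get? k = pvEnc n →
          ((PySem.Set.ofList (pvHitsList l)).foldl
              (fun t ins => t.insert ins (t.getD ins 0 + 1)) t).get? k
            = pvEnc (n + if PySem.Str.isIn k l then 1 else 0) := by
        intro k n hkpa hge
        rw [pvSetFold _ hnd t k]
        by_cases hin : PySem.Str.isIn k l = true
        · rw [if_pos ((pvHits_mem l k hkpa).2 hin), pvGetD_enc t k n hge, hin]
          simp [pvEnc]
        · rw [if_neg (fun hmem => hin ((pvHits_mem l k hkpa).1 hmem)), hge]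
          simp only [PySem.Str.isIn_eq] at hin
          rw [Bool.not_eq_true] at hin
          simp [pvEnc, hin]
      obtain ⟨c1, c2, c3⟩ := ih _
        (n1 + if PySem.Str.isIn "'pacibsp'" l then 1 else 0)
        (n2 + if PySem.Str.isIn "'autibsp'" l then 1 else 0)
        (n3 + if PySem.Str.isIn "'xpaclri'" l then 1 else 0)
        (step _ n1 (by simp [pa_instructions]) h1)
        (step _ n2 (by simp [pa_instructions]) h2)
        (step _ n3 (by simp [pa_instructions]) h3)
      refine ⟨?_, ?_, ?_⟩
      · rw [c1]; congr 1; rw [List.countP_cons]; split_ifs <;> simp_all <;> omega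
      · rw [c2]; congr 1; rw [List.countP_cons]; split_ifs <;> simp_all <;> omega
      · rw [c3]; congr 1; rw [List.countP_cons]; split_ifs <;> simp_all <;> omega

-- one pass of A's inner loop over the three fixed instructions
theorem pvStepA (l : String) (x y z : Int) :
    pa_instructions.foldl (fun d ins =>
        if PySem.Str.isIn ins l then d.modify ins 0 (· + 1) else d)
      (PySem.Dict.mk [("'pacibsp'", x), ("'autibsp'", y), ("'xpaclri'", z)])
    = PySem.Dict.mk [("'pacibsp'", x + if PySem.Str.isIn "'pacibsp'" l then 1 else 0),
                     ("'autibsp'", y + if PySem.Str.isIn "'autibsp'" l then 1 else 0),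
                     ("'xpaclri'", z + if PySem.Str.isIn "'xpaclri'" l then 1 else 0)] := by
  by_cases h1 : PySem.Str.isIn "'pacibsp'" l <;>
  by_cases h2 : PySem.Str.isIn "'autibsp'" l <;>
  by_cases h3 : PySem.Str.isIn "'xpaclri'" l <;>
    simp_all [pa_instructions, PySem.Dict.modify, PySem.Dict.insert,
      PySem.Dict.contains, PySem.Dict.getD, PySem.Dict.get?, List.find?]

-- A's outer loop accumulates, per instruction, the number of lines containing it
theorem pvLoopA (ls : List String) (x y z : Int) :
    ls.foldl (fun d l =>
        pa_instructions.foldl (fun d ins =>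
          if PySem.Str.isIn ins l then d.modify ins 0 (· + 1) else d) d)
      (PySem.Dict.mk [("'pacibsp'", x), ("'autibsp'", y), ("'xpaclri'", z)])
    = PySem.Dict.mk
        [("'pacibsp'", x + (ls.countP (fun l => PySem.Str.isIn "'pacibsp'" l) : Int)),
         ("'autibsp'", y + (ls.countP (fun l => PySem.Str.isIn "'autibsp'" l) : Int)),
         ("'xpaclri'", z + (ls.countP (fun l => PySem.Str.isIn "'xpaclri'" l) : Int))] := by
  induction ls generalizing x y z with
  | nil => simp
  | cons l ls ih =>
      rw [List.foldl_cons, pvStepA, ih]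
      simp only [List.countP_cons, PySem.Dict.mk.injEq, List.cons.injEq, Prod.mk.injEq,
        and_true, true_and]
      refine ⟨?_, ?_, ?_⟩ <;> (split_ifs <;> push_cast <;> ring)

theorem pvMain (ls : List String) : ins_frequency ls = ins_frequency_alt ls := by
  have hc0 : (pa_instructions.foldl (fun d k => d.insert k 0) PySem.Dict.empty
      : PySem.Dict String Int)
      = PySem.Dict.mk [("'pacibsp'", 0), ("'autibsp'", 0), ("'xpaclri'", 0)] := by rfl
  have key := pvLoopA ls 0 0 0
  simp only [zero_add] at key
  obtain ⟨b1, b2, b3⟩ := pvLoopB ls PySem.Dict.empty 0 0 0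
    (by simp [pvEnc]) (by simp [pvEnc]) (by simp [pvEnc])
  simp only [Nat.zero_add] at b1 b2 b3
  unfold pvHitsList at b1 b2 b3
  simp only [ins_frequency, ins_frequency_alt, hc0, key]
  simp only [PySem.Dict.contains_eq_isSome_get?, PySem.Dict.getD_eq_get?_getD]
  simp only [PySem.Dict.getD_eq_get?_getD] at b1 b2 b3
  simp only [pa_instructions, List.foldl_cons, List.foldl_nil]
  simp only [pa_instructions] at b1 b2 b3
  rw [b1, b2, b3]
  generalize List.countP (fun l => PySem.Str.isIn "'pacibsp'" l) ls = n1 at key ⊢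
  generalize List.countP (fun l => PySem.Str.isIn "'autibsp'" l) ls = n2 at key ⊢
  generalize List.countP (fun l => PySem.Str.isIn "'xpaclri'" l) ls = n3 at key ⊢
  by_cases h1 : n1 = 0 <;> by_cases h2 : n2 = 0 <;> by_cases h3 : n3 = 0 <;>
    simp [h1, h2, h3, pvEnc, PySem.Dict.keys, PySem.Dict.get?, PySem.Dict.erase,
      PySem.Dict.insert, PySem.Dict.contains, PySem.Dict.empty, List.find?, List.filter]

-- ===== VERDICT (by name: the statement is the Claim_ definition above) =====
theorem ins_frequency_spec : Claim_equal_ins_frequency := by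
  intro ls _
  unfold Spec_ins_frequency
  exact pvMain ls
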